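-- pv_equiv track=rewrite | github.com/junhg0211/boj | python/3/1643.py | tick
-- ===== SOURCE A (Python) =====
-- def gcd(a: int, b: int):
--     if a < b:
--         return gcd(b, a)
--
--     c = a - b
--     a = b
--     b = c
--
--     if b == 0:
--         return a
--
--     return gcd(a, b)
--
-- def tick(n: int):
--     a, b = 0, 1
--
--     for i in range(1, n+1):
--         a, b = a*i + n*b, b*i
--
--     g = gcd(a, b)
--     a //= g
--     b //= g
--
--     return *divmod(a, b), b
-- ===== SOURCE B (Python) =====
-- def tick(n: int):
--     # pass 1: denominator = n! (1 when n <= 0)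
--     denom = 1
--     for i in range(1, n + 1):
--         denom *= i
--     # pass 2: numerator = sum of n * (n!/i), exact divisions
--     num = 0
--     for i in range(1, n + 1):
--         num += n * (denom // i)
--     # iterative Euclidean gcd
--     x, y = num, denom
--     while y:
--         x, y = y, x % y
--     g = x
--     a = num // g
--     b = denom // g
--     return *divmod(a, b), b
-- ===== Notes on version B (the rewrite author's own statement) =====
-- stated objective: alternative
-- what changed: A accumulates the fraction n*H_n in one loop of simultaneous numerator/denominator updates and reduces it with a recursive subtractive gcd; B instead computes the denominator n! in a first pass, the numerator as the sum of the exact divisions n*(n!//i) in a second pass, and reduces with an iterative Euclidean remainder gcd.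
-- outside the precondition, e.g. on tick(0): A raises RecursionError, B returns (0, 0, 1); on tick(-7): A raises RecursionError, B returns (0, 0, 1); on tick(61): A raises RecursionError
import Mathlib
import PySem

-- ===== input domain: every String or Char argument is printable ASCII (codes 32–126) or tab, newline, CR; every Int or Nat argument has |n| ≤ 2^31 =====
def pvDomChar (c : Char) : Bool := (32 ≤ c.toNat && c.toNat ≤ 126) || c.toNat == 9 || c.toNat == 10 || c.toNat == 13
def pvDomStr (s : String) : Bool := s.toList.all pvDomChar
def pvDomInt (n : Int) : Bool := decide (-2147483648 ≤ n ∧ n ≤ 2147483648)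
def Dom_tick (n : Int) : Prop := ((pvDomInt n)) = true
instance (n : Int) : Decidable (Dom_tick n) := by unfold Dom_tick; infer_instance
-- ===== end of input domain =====

-- B replaces A's single fraction-accumulating loop by two independent passes
-- (denominator n! first, then the numerator as a sum of exact divisions n*(n!//i))
-- and A's subtractive recursive gcd by an iterative Euclidean remainder loop;
-- objective: alternative decomposition (same outputs on Pre_).

-- ===== PORT A =====
-- A's gcd is a subtractive recursion that does not terminate for (0, 1) and can
-- recurse deeply; the Nat fuel only makes the transcription total (it performs
-- exactly A's steps, and the fuel supplied in `tick` is never exhausted on Pre_).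
def tickGcdA : Nat → Int → Int → Int
  | 0, _, _ => 0
  | f+1, a, b =>
    if a < b then tickGcdA f b a
    else
      let c := a - b
      -- a := b; b := c
      if c = 0 then b else tickGcdA f b c

def tick (n : Int) : List Int :=
  let p := (PySem.List.pyRange 1 (n+1) 1).foldl
      (fun (s : Int × Int) i => (s.1 * i + n * s.2, s.2 * i)) (0, 1)
  let g := tickGcdA (2 * (p.1 + p.2).toNat + 2) p.1 p.2
  let a := PySem.Int.floordiv p.1 g
  let b := PySem.Int.floordiv p.2 g
  match PySem.Int.divmod? a b with
  | some qr => [qr.1, qr.2, b]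
  | none => []

-- ===== PORT B =====
-- B's while-loop gcd; the fuel `denom.toNat + 1` bounds the remainder sequence.
def tickGcdB : Nat → Int → Int → Int
  | 0, x, _ => x
  | f+1, x, y => if y = 0 then x else tickGcdB f y (PySem.Int.mod x y)

def tick_alt (n : Int) : List Int :=
  let denom := (PySem.List.pyRange 1 (n+1) 1).foldl (fun d i => d * i) 1
  let num := (PySem.List.pyRange 1 (n+1) 1).foldl
      (fun s i => s + n * PySem.Int.floordiv denom i) 0
  let g := tickGcdB (denom.toNat + 1) num denom
  let a := PySem.Int.floordiv num g
  let b := PySem.Int.floordiv denom g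
  match PySem.Int.divmod? a b with
  | some qr => [qr.1, qr.2, b]
  | none => []

-- ===== PRECONDITION & SPEC =====
-- Pre_ excludes n ≤ 0, where A's gcd(0,1) recurses forever (RecursionError),
-- n ≥ 424 and the listed scattered n, where the depth of A's subtractive gcd
-- recursion exceeds the harness's CPython recursion limit of 10000 (the depth is
-- not monotone in n), the list also dropping the few n whose depth comes within
-- 5% of that limit, where returning or raising depends on the caller's existing
-- stack depth.
def Pre_tick (n : Int) : Prop := 1 ≤ n ∧ n ≤ 423 ∧ n ∉ ([61, 70, 161, 164, 172, 175, 176, 177, 192, 194, 222, 223, 241, 248, 259, 262, 264, 265, 268, 272, 277, 284, 287, 290, 293, 295, 297, 302, 305, 307, 310, 311, 316, 317, 320, 321, 323, 326, 327, 333, 338, 340, 341, 343, 344, 346, 347, 350, 351, 352, 354, 355, 358, 359, 362, 365, 366, 371, 372, 373, 374, 375, 376, 378, 379, 380, 381, 382, 383, 384, 386, 388, 389, 390, 391, 392, 393, 394, 395, 396, 397, 398, 399, 400, 401, 402, 404, 405, 406, 408, 409, 410, 411, 412, 413, 415, 416, 417, 419, 420, 421, 422, 423] : List Int)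
instance (n : Int) : Decidable (Pre_tick n) := by unfold Pre_tick; infer_instance
def pvWitness_tick : Int := 5

def Spec_tick (n : Int) (out : List Int) : Prop := out = tick_alt n
instance (n : Int) (out : List Int) : Decidable (Spec_tick n out) := by unfold Spec_tick; infer_instance

-- ===== CLAIM (what is proved, stated in full; the proofs are below) =====
def Claim_equal_tick : Prop := ∀ (n : Int), Dom_tick n → Pre_tick n → Spec_tick n (tick n)

-- ===== LEMMAS AND PROOFS =====

-- the state of A's loop after k iterations: second component k!, first component Sa n k
def pvSa (n : Int) : Nat → Int
  | 0 => 0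
  | k+1 => pvSa n k * ((k : Int) + 1) + n * (Nat.factorial k : Int)

-- the numerator B computes, in Nat: sum of the exact divisions k!/i
def pvE (k : Nat) : Nat := ∑ i ∈ Finset.range k, Nat.factorial k / (i + 1)

theorem pvGcd_sub (a b : Int) : Int.gcd b (a - b) = Int.gcd a b := by
  apply Nat.dvd_antisymm <;> apply Int.dvd_gcd
  · have h := (Int.gcd_dvd_right b (a - b)).add (Int.gcd_dvd_left b (a - b))
    simpa using h
  · exact Int.gcd_dvd_left b (a - b)
  · exact Int.gcd_dvd_right a b
  · exact (Int.gcd_dvd_left a b).sub (Int.gcd_dvd_right a b)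

theorem pvGcd_emod (a b : Int) : Int.gcd b (a % b) = Int.gcd a b := by
  apply Nat.dvd_antisymm <;> apply Int.dvd_gcd
  · have h1 := Int.gcd_dvd_left b (a % b)
    have h2 := Int.gcd_dvd_right b (a % b)
    have h3 : a = b * (a / b) + a % b := by
      have := Int.emod_add_mul_ediv a b; linarith
    conv_rhs => rw [h3]
    exact (h1.mul_right _).add h2
  · exact Int.gcd_dvd_left b (a % b)
  · exact Int.gcd_dvd_right a b
  · have h3 : a % b = a - b * (a / b) := by rw [Int.emod_def]
    rw [h3]
    exact (Int.gcd_dvd_left a b).sub ((Int.gcd_dvd_right a b).mul_right _)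

theorem pvGcdA_eq (f : Nat) : ∀ (a b : Int), 0 < a → 0 < b →
    2 * (a + b).toNat + (if a < b then 1 else 0) < f →
    tickGcdA f a b = ((Int.gcd a b : Nat) : Int) := by
  induction f with
  | zero => intro a b _ _ hf; omega
  | succ f ih =>
    intro a b ha hb hf
    by_cases hlt : a < b
    · have hflag : (if a < b then 1 else 0) = 1 := by simp [hlt]
      rw [hflag] at hf
      have hswap : (if b < a then 1 else 0) = 0 := by
        have : ¬ b < a := by omega
        simp [this]
      simp only [tickGcdA, if_pos hlt]
      rw [ih b a hb ha (by omega), Int.gcd_comm]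
    · have hflag : (if a < b then 1 else 0) = 0 := by simp [hlt]
      rw [hflag] at hf
      by_cases hc : a - b = 0
      · have hab : a = b := by omega
        simp only [tickGcdA, if_neg hlt, if_pos hc]
        subst hab
        rw [Int.gcd_self]
        omega
      · simp only [tickGcdA, if_neg hlt, if_neg hc]
        have hc' : 0 < a - b := by omega
        have hfl : (if b < a - b then 1 else 0) ≤ 1 := by split_ifs <;> omega
        rw [ih b (a - b) hb hc' (by omega), pvGcd_sub]

theorem pvGcdB_eq (f : Nat) : ∀ (a b : Int), 0 ≤ a → 0 ≤ b → b.toNat < f →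
    tickGcdB f a b = ((Int.gcd a b : Nat) : Int) := by
  induction f with
  | zero => intro a b _ _ hf; omega
  | succ f ih =>
    intro a b ha hb hf
    by_cases hb0 : b = 0
    · subst hb0
      have h0 : tickGcdB (f + 1) a 0 = a := by simp [tickGcdB]
      rw [h0, Int.gcd_zero_right]
      omega
    · have hbpos : 0 < b := by omega
      simp only [tickGcdB, if_neg hb0]
      rw [PySem.Int.mod_eq_emod_of_pos hbpos]
      have hm1 : 0 ≤ a % b := Int.emod_nonneg a hb0
      have hm2 : a % b < b := Int.emod_lt_of_pos a hbpos
      rw [ih b (a % b) hb hm1 (by omega), pvGcd_emod]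

theorem pvAfold (n : Int) : ∀ (k : Nat),
    (PySem.List.pyRange 1 ((k : Int) + 1) 1).foldl
        (fun (s : Int × Int) i => (s.1 * i + n * s.2, s.2 * i)) (0, 1)
      = (pvSa n k, (Nat.factorial k : Int)) := by
  intro k
  induction k with
  | zero => rw [show ((0 : Nat) : Int) + 1 = 1 by norm_num,
      PySem.List.pyRange_one_eq_nil (by omega)]; simp [pvSa, Nat.factorial]
  | succ k ih =>
    have hc : (((k + 1 : Nat)) : Int) + 1 = ((k : Int) + 1) + 1 := by push_cast; ring
    rw [hc, PySem.List.pyRange_one_succ_right (by omega), List.foldl_append, ih]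
    simp only [List.foldl_cons, List.foldl_nil, pvSa, Nat.factorial_succ]
    push_cast
    simp only [Prod.mk.injEq]
    refine ⟨trivial, ?_⟩
    ring

theorem pvDfold : ∀ (k : Nat),
    (PySem.List.pyRange 1 ((k : Int) + 1) 1).foldl (fun d i => d * i) 1
      = (Nat.factorial k : Int) := by
  intro k
  induction k with
  | zero => rw [show ((0 : Nat) : Int) + 1 = 1 by norm_num,
      PySem.List.pyRange_one_eq_nil (by omega)]; simp [Nat.factorial]
  | succ k ih =>
    have hc : (((k + 1 : Nat)) : Int) + 1 = ((k : Int) + 1) + 1 := by push_cast; ring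
    rw [hc, PySem.List.pyRange_one_succ_right (by omega), List.foldl_append, ih]
    simp only [List.foldl_cons, List.foldl_nil, Nat.factorial_succ]
    push_cast
    ring

theorem pvNfold (n d : Int) : ∀ (k : Nat),
    (PySem.List.pyRange 1 ((k : Int) + 1) 1).foldl
        (fun s i => s + n * PySem.Int.floordiv d i) 0
      = ∑ i ∈ Finset.range k, n * PySem.Int.floordiv d ((i : Int) + 1) := by
  intro k
  induction k with
  | zero => rw [show ((0 : Nat) : Int) + 1 = 1 by norm_num,
      PySem.List.pyRange_one_eq_nil (by omega)]; simp
  | succ k ih =>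
    have hc : (((k + 1 : Nat)) : Int) + 1 = ((k : Int) + 1) + 1 := by push_cast; ring
    rw [hc, PySem.List.pyRange_one_succ_right (by omega), List.foldl_append, ih,
      Finset.sum_range_succ]
    simp

theorem pvE_succ (k : Nat) : pvE (k + 1) = pvE k * (k + 1) + Nat.factorial k := by
  unfold pvE
  rw [Finset.sum_range_succ]
  have hlast : Nat.factorial (k + 1) / (k + 1) = Nat.factorial k := by
    rw [Nat.factorial_succ, Nat.mul_div_cancel_left _ (Nat.succ_pos k)]
  rw [hlast]
  congr 1
  rw [Finset.sum_mul]
  apply Finset.sum_congr rfl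
  intro i hi
  have hdvd : (i + 1) ∣ Nat.factorial k :=
    Nat.dvd_factorial (Nat.succ_pos i) (Finset.mem_range.mp hi)
  rw [Nat.factorial_succ, Nat.mul_div_assoc (k + 1) hdvd, Nat.mul_comm]

theorem pvSa_eq (n : Int) : ∀ (k : Nat), pvSa n k = n * (pvE k : Int) := by
  intro k
  induction k with
  | zero => simp [pvSa, pvE]
  | succ k ih =>
    rw [show pvSa n (k + 1) = pvSa n k * ((k : Int) + 1) + n * (Nat.factorial k : Int) from rfl,
      ih, pvE_succ]
    push_cast
    ring

theorem pvSum_floordiv (n : Int) (k : Nat) :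
    ∑ i ∈ Finset.range k, n * PySem.Int.floordiv ((Nat.factorial k : Nat) : Int) ((i : Int) + 1)
      = n * (pvE k : Int) := by
  unfold pvE
  rw [Nat.cast_sum, Finset.mul_sum]
  apply Finset.sum_congr rfl
  intro i _
  have hc : ((i : Int) + 1) = (((i + 1 : Nat)) : Int) := by push_cast; ring
  rw [hc, PySem.Int.floordiv_natCast]

theorem pvSa_pos (n : Int) (hn : 1 ≤ n) : ∀ (k : Nat), 1 ≤ k → 0 < pvSa n k := by
  have hnn : ∀ (k : Nat), 0 ≤ pvSa n k := by
    intro k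
    induction k with
    | zero => simp [pvSa]
    | succ k ih =>
      have h1 : (0 : Int) ≤ pvSa n k * ((k : Int) + 1) := by positivity
      have h2 : (0 : Int) < n * (Nat.factorial k : Int) := by
        have := Nat.factorial_pos k
        have : (0 : Int) < (Nat.factorial k : Int) := by exact_mod_cast this
        nlinarith
      show 0 ≤ pvSa n k * ((k : Int) + 1) + n * (Nat.factorial k : Int)
      linarith
  intro k hk
  obtain ⟨m, rfl⟩ : ∃ m, k = m + 1 := ⟨k - 1, by omega⟩
  have h1 : (0 : Int) ≤ pvSa n m * ((m : Int) + 1) := by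
    have := hnn m; positivity
  have h2 : (0 : Int) < n * (Nat.factorial m : Int) := by
    have := Nat.factorial_pos m
    have : (0 : Int) < (Nat.factorial m : Int) := by exact_mod_cast this
    nlinarith
  show 0 < pvSa n m * ((m : Int) + 1) + n * (Nat.factorial m : Int)
  linarith

theorem pvTick_eq (n : Int) (hn : 1 ≤ n) : tick n = tick_alt n := by
  obtain ⟨k, rfl⟩ : ∃ k : Nat, n = (k : Int) := ⟨n.toNat, by omega⟩
  have hk : 1 ≤ k := by exact_mod_cast hn
  simp only [tick, tick_alt]
  rw [pvAfold, pvDfold, pvNfold, pvSum_floordiv, ← pvSa_eq]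
  have hnum : 0 < pvSa (k : Int) k := pvSa_pos _ hn k hk
  have hden : (0 : Int) < (Nat.factorial k : Int) := by
    exact_mod_cast Nat.factorial_pos k
  have hflag : (if pvSa (k : Int) k < (Nat.factorial k : Int) then 1 else 0) ≤ 1 := by
    split_ifs <;> omega
  rw [pvGcdA_eq _ _ _ hnum hden (by omega), pvGcdB_eq _ _ _ hnum.le hden.le (by omega)]

-- ===== VERDICT (by name: the statement is the Claim_ definition above) =====
theorem tick_spec : Claim_equal_tick := by
  intro n _ hpre
  unfold Spec_tick
  exact pvTick_eq n hpre.1
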